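-- pv_equiv track=rewrite | github.com/keithpij/python-sandbox | ml/ray-sgd/pytorch_sa.py | create_tokens
-- ===== SOURCE A (Python) =====
-- from collections import Counter
--
-- def create_tokens(X):
--     all_words_string = ' '.join(X)
--     words_list = all_words_string.split()
--     count_by_word = Counter(words_list)
--     total_words = len(count_by_word)
--     count_by_word_sorted = count_by_word.most_common(total_words)
--     word_to_int_mapping = {w:i+1 for i, (w,c) in enumerate(count_by_word_sorted)}
--
--     return word_to_int_mapping
-- ===== SOURCE B (Python) =====
-- from collections import Counter
--
-- def create_tokens(X):
--     # Bucket (counting) sort by frequency instead of Counter.most_common's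
--     # comparison sort; same join/split preprocessing and tie-breaking.
--     words_list = ' '.join(X).split()
--     count_by_word = Counter(words_list)
--     max_count = max(count_by_word.values(), default=0)
--     buckets = [[] for _ in range(max_count + 1)]
--     for w, c in count_by_word.items():
--         buckets[c].append(w)
--     order = []
--     for c in range(max_count, 0, -1):
--         order.extend(buckets[c])
--     return {w: i + 1 for i, w in enumerate(order)}
-- ===== Notes on version B (the rewrite author's own statement) =====
-- stated objective: alternative
-- what changed: Counter.most_common's comparison sort is replaced by a counting/bucket sort: words are appended to buckets indexed by their count in Counter order, then buckets are walked from the maximum count down to 1 to assign ranks, reproducing most_common's descending-count, first-occurrence tie-breaking.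
import Mathlib
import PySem

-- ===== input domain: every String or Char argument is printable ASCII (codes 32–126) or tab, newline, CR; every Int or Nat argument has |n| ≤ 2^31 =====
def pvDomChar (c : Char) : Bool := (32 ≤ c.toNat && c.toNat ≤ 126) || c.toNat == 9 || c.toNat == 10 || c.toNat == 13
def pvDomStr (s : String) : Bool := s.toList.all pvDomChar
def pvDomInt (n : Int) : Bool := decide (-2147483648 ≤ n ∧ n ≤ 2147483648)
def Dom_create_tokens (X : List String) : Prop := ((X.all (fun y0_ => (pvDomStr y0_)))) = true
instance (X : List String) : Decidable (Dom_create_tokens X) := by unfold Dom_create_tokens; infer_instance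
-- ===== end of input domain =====

-- B replaces Counter.most_common's comparison sort by a counting/bucket sort over
-- frequencies (same join/split preprocessing and tie-breaking); objective: alternative.

-- ===== PORT A =====
def create_tokens (X : List String) : List (String × Int) :=
  let all_words_string := PySem.Str.join " " X
  let words_list := PySem.Str.split₀ all_words_string
  let count_by_word := PySem.Dict.counter words_list
  let total_words : Int := (count_by_word.size : Int)
  -- most_common(n) = stable sort by count descending, first n entries
  let count_by_word_sorted :=
    (PySem.List.sorted count_by_word.items (fun p => p.2) true).take total_words.toNat
  ((PySem.List.enumerate count_by_word_sorted 0).foldl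
    (fun d p => d.insert p.2.1 (p.1 + 1)) PySem.Dict.empty).items

-- ===== PORT B =====
-- buckets[c].append(w)  (c is always in range: 1 ≤ count ≤ max_count)
def bucketAdd (bk : List (List String)) (c : Nat) (w : String) : List (List String) :=
  bk.set c (bk.getD c [] ++ [w])

def create_tokens_alt (X : List String) : List (String × Int) :=
  let words_list := PySem.Str.split₀ (PySem.Str.join " " X)
  let count_by_word := PySem.Dict.counter words_list
  let max_count := PySem.List.maxD count_by_word.values (fun v => v) 0
  let buckets := count_by_word.items.foldl
    (fun bk p => bucketAdd bk p.2.toNat p.1)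
    (List.replicate (max_count.toNat + 1) [])
  let order := (PySem.List.pyRange max_count 0 (-1)).foldl
    (fun acc c => acc ++ buckets.getD c.toNat []) []
  ((PySem.List.enumerate order 0).foldl
    (fun d p => d.insert p.2 (p.1 + 1)) PySem.Dict.empty).items

-- ===== PRECONDITION & SPEC =====
def Spec_create_tokens (X : List String) (out : List (String × Int)) : Prop := out = create_tokens_alt X
instance (X : List String) (out : List (String × Int)) : Decidable (Spec_create_tokens X out) := by unfold Spec_create_tokens; infer_instance

-- ===== CLAIM (what is proved, stated in full; the proofs are below) =====
def Claim_equal_create_tokens : Prop := ∀ (X : List String), Dom_create_tokens X → Spec_create_tokens X (create_tokens X)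

-- ===== LEMMAS AND PROOFS =====

theorem flatMap_congr_mem {α β : Type} (l : List α) (f g : α → List β)
    (h : ∀ a ∈ l, f a = g a) : l.flatMap f = l.flatMap g := by
  induction l with
  | nil => rfl
  | cons a l ih => simp [List.flatMap_cons, h a (by simp), ih (fun a ha => h a (by simp [ha]))]

-- insertBy passes over a prefix it is never placed before
theorem insertBy_skip {α : Type} (before : α → α → Bool) (x : α) (as bs : List α)
    (h : ∀ a ∈ as, before x a = false) :
    PySem.List.insertBy before x (as ++ bs) = as ++ PySem.List.insertBy before x bs := by
  induction as with
  | nil => simp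
  | cons a as ih =>
    have ha := h a (by simp)
    simp [PySem.List.insertBy, ha, ih (fun a ha' => h a (by simp [ha']))]

-- insertBy places x at the head when it goes before every element
theorem insertBy_head {α : Type} (before : α → α → Bool) (x : α) (bs : List α)
    (h : ∀ b ∈ bs, before x b = true) :
    PySem.List.insertBy before x bs = x :: bs := by
  cases bs with
  | nil => rfl
  | cons b bs => simp [PySem.List.insertBy, h b (by simp)]

-- one insertion step of the stable descending sort, seen on the bucket decomposition
theorem insertBy_flatMap_buckets {α : Type} (key : α → Int) (x : α) (xs : List α)
    (L : List Int) (hL : L.Pairwise (fun a b => b < a)) (hx : key x ∈ L) :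
    PySem.List.insertBy (fun a b => decide (key b < key a)) x
      (L.flatMap (fun c => xs.filter (fun y => key y = c)))
      = L.flatMap (fun c => (xs ++ [x]).filter (fun y => key y = c)) := by
  induction L with
  | nil => simp at hx
  | cons c L ih =>
    rw [List.pairwise_cons] at hL
    obtain ⟨hcL, hL'⟩ := hL
    simp only [List.flatMap_cons]
    have hskip : ∀ a ∈ xs.filter (fun y => decide (key y = c)),
        (fun a b => decide (key b < key a)) x a = false := by
      intro a ha
      have := List.of_mem_filter ha
      simp at this ⊢
      by_cases hxc : key x = c
      · omega
      · have hx' : key x ∈ L := by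
          rcases List.mem_cons.mp hx with h | h
          · exact absurd h hxc
          · exact h
        have := hcL _ hx'
        omega
    rw [insertBy_skip _ _ _ _ hskip]
    by_cases hxc : key x = c
    · have hhead : ∀ b ∈ L.flatMap (fun c' => xs.filter (fun y => key y = c')),
          (fun a b => decide (key b < key a)) x b = true := by
        intro b hb
        simp only [List.mem_flatMap] at hb
        obtain ⟨c', hc', hbf⟩ := hb
        have := List.of_mem_filter hbf
        simp at this ⊢
        have := hcL _ hc'
        omega
      rw [insertBy_head _ _ _ hhead]
      have htail : ∀ c' ∈ L, (xs ++ [x]).filter (fun y => decide (key y = c'))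
          = xs.filter (fun y => decide (key y = c')) := by
        intro c' hc'
        have : key x ≠ c' := by have := hcL _ hc'; omega
        simp [List.filter_append, this]
      rw [flatMap_congr_mem L _ _ htail]
      simp [List.filter_append, hxc]
    · have hx' : key x ∈ L := by
        rcases List.mem_cons.mp hx with h | h
        · exact absurd h hxc
        · exact h
      rw [ih hL' hx']
      simp [List.filter_append, hxc]

-- the stable descending sort IS the walk over buckets by strictly decreasing key value
theorem sorted_rev_eq_flatMap_buckets {α : Type} (key : α → Int) (xs : List α)
    (L : List Int) (hL : L.Pairwise (fun a b => b < a)) (hmem : ∀ x ∈ xs, key x ∈ L) :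
    PySem.List.sorted xs key true = L.flatMap (fun c => xs.filter (fun y => key y = c)) := by
  induction xs using List.reverseRecOn with
  | nil => simp [PySem.List.sorted]
  | append_singleton xs x ih =>
    rw [PySem.List.sorted_rev_eq_foldl_insertBy, List.foldl_append,
        ← PySem.List.sorted_rev_eq_foldl_insertBy]
    simp only [List.foldl_cons, List.foldl_nil]
    rw [ih (fun y hy => hmem y (List.mem_append_left _ hy))]
    exact insertBy_flatMap_buckets key x xs L hL (hmem x (by simp))

theorem enumerate_map {α β : Type} (f : α → β) (l : List α) (s : Int) :
    PySem.List.enumerate (l.map f) s = (PySem.List.enumerate l s).map (fun q => (q.1, f q.2)) := by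
  induction l generalizing s with
  | nil => simp [PySem.List.enumerate_nil]
  | cons a l ih => simp [PySem.List.enumerate_cons, ih]

-- what B's bucket-filling loop leaves in bucket c
theorem bucket_fold (l : List (String × Int)) (bk : List (List String))
    (h : ∀ p ∈ l, p.2.toNat < bk.length) (c : Nat) (hc : c < bk.length) :
    (l.foldl (fun bk p => bucketAdd bk p.2.toNat p.1) bk).getD c []
      = bk.getD c [] ++ (l.filter (fun p => p.2.toNat = c)).map Prod.fst := by
  induction l generalizing bk with
  | nil => simp
  | cons p l ih =>
    simp only [List.foldl_cons, List.filter_cons]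
    have hlen : (bucketAdd bk p.2.toNat p.1).length = bk.length := by simp [bucketAdd]
    rw [ih (bucketAdd bk p.2.toNat p.1)
        (fun q hq => by rw [hlen]; exact h q (by simp [hq])) (hlen ▸ hc)]
    by_cases hpc : p.2.toNat = c
    · subst hpc
      have h1 : (bucketAdd bk p.2.toNat p.1).getD p.2.toNat [] = bk.getD p.2.toNat [] ++ [p.1] := by
        simp [bucketAdd, List.getD_eq_getElem?_getD, hc]
      simp only [List.getD_eq_getElem?_getD] at h1 ⊢
      simp [h1]
    · have h1 : (bucketAdd bk p.2.toNat p.1).getD c [] = bk.getD c [] := by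
        simp [bucketAdd, List.getD_eq_getElem?_getD, List.getElem?_set_ne, hpc]
      simp only [List.getD_eq_getElem?_getD] at h1 ⊢
      simp [h1, hpc]

-- range(mc, 0, -1) is [mc, mc-1, …, 1]
theorem pyRange_down (mc : Int) (hmc : 0 ≤ mc) :
    PySem.List.pyRange mc 0 (-1) = (List.range mc.toNat).map (fun k : Nat => mc - (k : Int)) := by
  simp only [PySem.List.pyRange]
  norm_num
  rcases eq_or_lt_of_le hmc with h | h
  · simp [← h]
  · rw [if_pos h]
    apply List.map_congr_left
    intro k _
    omega

set_option maxHeartbeats 1000000 in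
theorem create_tokens_core (X : List String) :
    create_tokens X = create_tokens_alt X := by
  simp only [create_tokens, create_tokens_alt]
  set ws := PySem.Str.split₀ (PySem.Str.join " " X) with hws
  set d := PySem.Dict.counter ws with hd
  set items := d.items with hitems
  set mc := PySem.List.maxD d.values (fun v => v) 0 with hmc
  -- every stored count is at least 1 and at most mc, and 0 ≤ mc
  have h1 : ∀ p ∈ items, 1 ≤ p.2 := by
    intro p hp
    rw [hitems, hd, PySem.Dict.items_counter] at hp
    obtain ⟨k, hk, rfl⟩ := List.mem_map.mp hp
    have : k ∈ ws := (PySem.Set.mem_ofList ws k).mp hk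
    have := List.count_pos_iff.mpr this
    simpa using this
  have hval : ∀ v ∈ d.values, ∃ p ∈ items, v = p.2 := by
    intro v hv
    simp only [PySem.Dict.values, List.mem_map] at hv
    obtain ⟨p, hp, rfl⟩ := hv
    exact ⟨p, hp, rfl⟩
  have h2 : ∀ p ∈ items, p.2 ≤ mc := by
    intro p hp
    have hpv : p.2 ∈ d.values := by
      simp only [PySem.Dict.values, List.mem_map]; exact ⟨p, hp, rfl⟩
    rcases hm : PySem.List.max? d.values (fun v => v) with _ | m
    · rw [(PySem.List.max?_eq_none_iff _ _).mp hm] at hpv; simp at hpv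
    · have := PySem.List.max?_isMax hm p.2 hpv
      rw [hmc]; simp only [PySem.List.maxD, hm, Option.getD_some]
      exact this
  have h0 : 0 ≤ mc := by
    rcases hm : PySem.List.max? d.values (fun v => v) with _ | m
    · rw [hmc]; simp [PySem.List.maxD, hm]
    · have hmem := PySem.List.max?_mem hm
      obtain ⟨p, hp, hpe⟩ := hval m hmem
      have := h1 p hp
      rw [hmc]; simp only [PySem.List.maxD, hm, Option.getD_some]
      omega
  -- the descending range of candidate counts
  rw [pyRange_down mc h0]
  set cs := (List.range mc.toNat).map (fun k : Nat => mc - (k : Int)) with hcs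
  have hPW : cs.Pairwise (fun a b => b < a) := by
    rw [hcs]
    exact List.Pairwise.map _ (fun a b h => by omega) List.pairwise_lt_range
  have hmemcs : ∀ p ∈ items, p.2 ∈ cs := by
    intro p hp
    have := h1 p hp; have := h2 p hp
    rw [hcs]
    have hk : (mc - p.2).toNat < mc.toNat := by omega
    refine List.mem_map.mpr ⟨(mc - p.2).toNat, List.mem_range.mpr hk, ?_⟩
    show mc - (((mc - p.2).toNat : Nat) : Int) = p.2
    omega
  have hcsrange : ∀ c ∈ cs, 1 ≤ c ∧ c ≤ mc := by
    intro c hc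
    rw [hcs] at hc
    obtain ⟨k, hk, rfl⟩ := List.mem_map.mp hc
    have := List.mem_range.mp hk
    omega
  -- A's stable descending sort as the walk over buckets
  have hS : PySem.List.sorted items (fun p => p.2) true
      = cs.flatMap (fun c => items.filter (fun p => p.2 = c)) :=
    sorted_rev_eq_flatMap_buckets _ items cs hPW hmemcs
  -- B's order list is the same walk, projected to the words
  have hlenbound : ∀ p ∈ items, p.2.toNat < mc.toNat + 1 := by
    intro p hp; have := h1 p hp; have := h2 p hp; omega
  have horder : (cs.foldl (fun acc c =>
        acc ++ (items.foldl (fun bk p => bucketAdd bk p.2.toNat p.1)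
          (List.replicate (mc.toNat + 1) [])).getD c.toNat []) [])
      = (PySem.List.sorted items (fun p => p.2) true).map Prod.fst := by
    rw [PySem.List.foldl_append_eq_flatMap, List.nil_append, hS, List.map_flatMap]
    apply flatMap_congr_mem
    intro c hc
    obtain ⟨hc1, hc2⟩ := hcsrange c hc
    rw [bucket_fold items _ (by simpa using hlenbound) c.toNat (by simp; omega)]
    rw [List.getD_eq_getElem?_getD, List.getElem?_replicate, if_pos (by omega)]
    simp only [Option.getD_some, List.nil_append]
    congr 1
    apply List.filter_congr
    intro p hp
    have := h1 p hp
    simp only [decide_eq_decide]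
    omega
  rw [horder]
  -- both sides now build the identical dict
  have htake : (PySem.List.sorted items (fun p => p.2) true).take ((d.size : Int)).toNat
      = PySem.List.sorted items (fun p => p.2) true := by
    have : ((d.size : Int)).toNat = (PySem.List.sorted items (fun p => p.2) true).length := by
      rw [PySem.List.length_sorted]; simp [PySem.Dict.size, hitems]
    rw [this, List.take_length]
  rw [htake, enumerate_map, List.foldl_map]

-- ===== VERDICT (by name: the statement is the Claim_ definition above) =====
theorem create_tokens_spec : Claim_equal_create_tokens := by
  intro X _
  unfold Spec_create_tokens
  exact create_tokens_core X
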